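-- pv_equiv track=rewrite | github.com/eshun4/Data-Structures-and-Algorithms-in-Python-2024 | Sliding Window/max_with_at_most_3_bad_days.py | most_days_with_3_bad_days_at_most
-- ===== SOURCE A (Python) =====
-- def most_days_with_3_bad_days_at_most(sales):
--     # create best window
--     best = 0
--     # create left pointer
--     left = 0
--     # keep track of the number of bad days
--     num_of_bad_days = 0
--     # itearate through the sales
--     for right in range(len(sales)):
--         if sales[right] < 10:
--             while num_of_bad_days >= 3:
--                 if sales[left] < 10:
--                     num_of_bad_days -= 1
--                 left += 1
--             num_of_bad_days += 1
--         curr_window = right - left + 1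
--         best = max(curr_window, best)
--
--     return best
-- ===== SOURCE B (Python) =====
-- def most_days_with_3_bad_days_at_most(sales):
--     best = 0
--     left = 0
--     bad = []  # indices of bad days (sales < 10) inside the current window, oldest first
--     for right, s in enumerate(sales):
--         if s < 10:
--             bad.append(right)
--             if len(bad) > 3:
--                 left = bad.pop(0) + 1
--         best = max(best, right - left + 1)
--     return best
-- ===== Notes on version B (the rewrite author's own statement) =====
-- stated objective: idiomatic
-- what changed: B keeps a deque-style list of the bad-day indices in the window and, on a fourth bad day, jumps left directly past the popped oldest bad index, replacing A's counter plus inner while-scan over sales[left].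
import Mathlib
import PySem

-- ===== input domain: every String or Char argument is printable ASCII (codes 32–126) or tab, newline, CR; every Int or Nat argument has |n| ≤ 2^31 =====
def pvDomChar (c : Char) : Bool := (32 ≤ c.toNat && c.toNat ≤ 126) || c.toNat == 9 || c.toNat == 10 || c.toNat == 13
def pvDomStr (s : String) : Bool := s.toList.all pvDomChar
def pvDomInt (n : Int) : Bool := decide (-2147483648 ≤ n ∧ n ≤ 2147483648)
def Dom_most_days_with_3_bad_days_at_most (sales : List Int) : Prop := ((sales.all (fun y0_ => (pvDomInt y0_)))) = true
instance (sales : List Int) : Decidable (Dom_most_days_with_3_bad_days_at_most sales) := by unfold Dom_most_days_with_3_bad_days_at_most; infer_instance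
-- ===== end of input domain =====

-- B replaces A's counter plus inner shrink-scan by a list of the bad-day indices in the
-- window, jumping left past the oldest bad index in O(1) (objective: alternative/idiomatic).

-- ===== PORT A =====
-- A's inner 'while num_of_bad_days >= 3' loop; ported with fuel = sales.length, which is
-- proved sufficient (the counter counts bad days in the window, so a bad day lies ahead).
def shrinkA (sales : List Int) : Nat → Int → Int → Int × Int
  | 0, left, nb => (left, nb)
  | fuel+1, left, nb =>
    if 3 ≤ nb then
      -- sales[left]: in every reachable state 0 ≤ left < len sales, so pyGetD is exact here
      shrinkA sales fuel (left + 1)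
        (if PySem.List.pyGetD sales left 0 < 10 then nb - 1 else nb)
    else (left, nb)

-- one iteration of A's for-loop; state = (best, left, num_of_bad_days)
def stepA (sales : List Int) (st : Int × Int × Int) (right : Int) : Int × Int × Int :=
  -- sales[right]: right ∈ range(len(sales)) is always in range, so pyGetD is exact here
  let lnb :=
    if PySem.List.pyGetD sales right 0 < 10 then
      let s := shrinkA sales sales.length st.2.1 st.2.2
      (s.1, s.2 + 1)
    else (st.2.1, st.2.2)
  (max (right - lnb.1 + 1) st.1, lnb.1, lnb.2)

def most_days_with_3_bad_days_at_most (sales : List Int) : Int :=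
  ((PySem.List.pyRange 0 sales.length 1).foldl (stepA sales) (0, 0, 0)).1

-- ===== PORT B =====
-- one iteration of B's for-loop; state = (best, left, bad-index list)
def stepB (st : Int × Int × List Int) (p : Int × Int) : Int × Int × List Int :=
  let lb :=
    if p.2 < 10 then
      let bad := st.2.2 ++ [p.1]
      if 3 < bad.length then
        match bad with
        | [] => (st.2.1, bad)            -- unreachable: bad has length > 3 here
        | b0 :: rest => (b0 + 1, rest)   -- left = bad.pop(0) + 1
      else (st.2.1, bad)
    else (st.2.1, st.2.2)
  (max st.1 (p.1 - lb.1 + 1), lb.1, lb.2)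

def most_days_with_3_bad_days_at_most_alt (sales : List Int) : Int :=
  ((PySem.List.enumerate sales 0).foldl stepB (0, 0, ([] : List Int))).1

-- ===== PRECONDITION & SPEC =====
def Spec_most_days_with_3_bad_days_at_most (sales : List Int) (out : Int) : Prop := out = most_days_with_3_bad_days_at_most_alt sales
instance (sales : List Int) (out : Int) : Decidable (Spec_most_days_with_3_bad_days_at_most sales out) := by unfold Spec_most_days_with_3_bad_days_at_most; infer_instance

-- ===== CLAIM (what is proved, stated in full; the proofs are below) =====
def Claim_equal_most_days_with_3_bad_days_at_most : Prop := ∀ (sales : List Int), Dom_most_days_with_3_bad_days_at_most sales → Spec_most_days_with_3_bad_days_at_most sales (most_days_with_3_bad_days_at_most sales)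

-- ===== LEMMAS AND PROOFS =====

-- the bad-day indices in the half-open window [left, r)
def pvBad (sales : List Int) (left r : Int) : List Int :=
  (PySem.List.pyRange left r 1).filter (fun j => decide (PySem.List.pyGetD sales j 0 < 10))

lemma shrinkA_of_lt (sales : List Int) (fuel : Nat) (left nb : Int) (h : nb < 3) :
    shrinkA sales fuel left nb = (left, nb) := by
  cases fuel with
  | zero => rfl
  | succ f => simp [shrinkA, not_le.mpr h]

lemma pvBad_nil_good (sales : List Int) (left b0 : Int)
    (h : pvBad sales left b0 = []) (j : Int) (h1 : left ≤ j) (h2 : j < b0) :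
    ¬ PySem.List.pyGetD sales j 0 < 10 := by
  have hj : j ∈ PySem.List.pyRange left b0 1 := by
    rw [PySem.List.mem_pyRange_one]; exact ⟨h1, h2⟩
  have := List.filter_eq_nil_iff.mp h j hj
  simpa using this

lemma pvBad_tail (sales : List Int) (left b0 : Int)
    (hgood : ¬ PySem.List.pyGetD sales left 0 < 10) (hlt : left < b0) :
    pvBad sales (left + 1) b0 = pvBad sales left b0 := by
  unfold pvBad
  rw [PySem.List.pyRange_one_cons hlt]
  simp [hgood]

lemma shrinkA_spec (sales : List Int) (m : Nat) :
    ∀ (left : Int) (fuel : Nat) (b0 : Int),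
      0 ≤ left → left + m = b0 → b0 < sales.length →
      pvBad sales left b0 = [] → PySem.List.pyGetD sales b0 0 < 10 →
      m + 1 ≤ fuel →
      shrinkA sales fuel left 3 = (b0 + 1, 2) := by
  induction m with
  | zero =>
    intro left fuel b0 _ hb _ _ hbad hfuel
    obtain ⟨f, rfl⟩ : ∃ f, fuel = f + 1 := ⟨fuel - 1, by omega⟩
    have hlb : left = b0 := by omega
    subst hlb
    simp only [shrinkA, if_pos (by norm_num : (3:Int) ≤ 3), if_pos hbad]
    have h2 : (3:Int) - 1 = 2 := by norm_num
    rw [h2, shrinkA_of_lt sales f (left+1) 2 (by norm_num)]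
  | succ m ih =>
    intro left fuel b0 hl hb hlen hnil hbad hfuel
    obtain ⟨f, rfl⟩ : ∃ f, fuel = f + 1 := ⟨fuel - 1, by omega⟩
    have hlt : left < b0 := by omega
    have hgood := pvBad_nil_good sales left b0 hnil left le_rfl hlt
    simp only [shrinkA, if_pos (by norm_num : (3:Int) ≤ 3), if_neg hgood]
    exact ih (left + 1) f b0 (by omega) (by omega) hlen
      (by rw [pvBad_tail sales left b0 hgood hlt]; exact hnil) hbad (by omega)

lemma pvBad_cons (sales : List Int) (left r b0 : Int) (rest : List Int)
    (h : pvBad sales left r = b0 :: rest) :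
    left ≤ b0 ∧ b0 < r ∧ PySem.List.pyGetD sales b0 0 < 10 ∧
      pvBad sales left b0 = [] ∧ rest = pvBad sales (b0 + 1) r := by
  have hmem : b0 ∈ pvBad sales left r := by rw [h]; exact List.mem_cons_self
  have hmem' := List.mem_filter.mp hmem
  have hrange := PySem.List.mem_pyRange_one.mp hmem'.1
  have hbadb0 : PySem.List.pyGetD sales b0 0 < 10 := by simpa using hmem'.2
  have hsplit : PySem.List.pyRange left r 1 =
      PySem.List.pyRange left b0 1 ++ PySem.List.pyRange b0 r 1 :=
    PySem.List.pyRange_one_append left b0 r hrange.1 (le_of_lt hrange.2)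
  have hfil : pvBad sales left b0 ++ pvBad sales b0 r = b0 :: rest := by
    rw [← h]; unfold pvBad; rw [hsplit, List.filter_append]
  have hcons : pvBad sales b0 r = b0 :: pvBad sales (b0 + 1) r := by
    unfold pvBad; rw [PySem.List.pyRange_one_cons hrange.2]; simp [hbadb0]
  rw [hcons] at hfil
  have hXnil : pvBad sales left b0 = [] := by
    cases hX : pvBad sales left b0 with
    | nil => rfl
    | cons x xs =>
      exfalso
      rw [hX] at hfil
      have hx : x = b0 := by simpa using congrArg (·.head?) hfil
      have hxm : x ∈ pvBad sales left b0 := by rw [hX]; exact List.mem_cons_self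
      have := (PySem.List.mem_pyRange_one.mp (List.mem_filter.mp hxm).1).2
      omega
  rw [hXnil] at hfil
  simp only [List.nil_append, List.cons.injEq] at hfil
  exact ⟨hrange.1, hrange.2, hbadb0, hXnil, hfil.2.symm⟩

-- main invariant lemma: after processing indices [r, n) the two folds return equal bests,
-- provided bad = the bad indices in [left, r), nb = bad.length and bad has at most 3 elements
lemma go (sales : List Int) (k : Nat) :
    ∀ (r best left : Int) (bad : List Int),
      0 ≤ left → left ≤ r → r + k = sales.length →
      bad = pvBad sales left r → bad.length ≤ 3 →
      ((PySem.List.pyRange r sales.length 1).foldl (stepA sales)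
          (best, left, (bad.length : Int))).1
        = (((PySem.List.pyRange r sales.length 1).map
              (fun j => (j, PySem.List.pyGetD sales j 0))).foldl stepB (best, left, bad)).1 := by
  induction k with
  | zero =>
    intro r best left bad _ _ hk _ _
    have : PySem.List.pyRange r sales.length 1 = [] :=
      PySem.List.pyRange_one_eq_nil (by omega)
    simp [this]
  | succ k ih =>
    intro r best left bad hl hlr hk hbad hlen
    have hrn : r < (sales.length : Int) := by omega
    rw [PySem.List.pyRange_one_cons hrn, List.map_cons, List.foldl_cons, List.foldl_cons]
    by_cases hb : PySem.List.pyGetD sales r 0 < 10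
    · -- day r is bad
      have hbad' : pvBad sales left (r + 1) = bad ++ [r] := by
        subst hbad
        unfold pvBad
        rw [PySem.List.pyRange_one_succ_right hlr, List.filter_append]
        simp [hb]
      by_cases h3 : bad.length = 3
      · -- window already holds 3 bad days: jump past the oldest
        obtain ⟨b0, rest, rfl⟩ : ∃ b0 rest, bad = b0 :: rest := by
          cases bad with
          | nil => simp at h3
          | cons a l => exact ⟨a, l, rfl⟩
        obtain ⟨hlb0, hb0r, hbadb0, hnilX, hrest⟩ :=
          pvBad_cons sales left r b0 rest hbad.symm
        have hb0len : b0 < (sales.length : Int) := by omega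
        have hshr : shrinkA sales sales.length left 3 = (b0 + 1, 2) := by
          refine shrinkA_spec sales (b0 - left).toNat left sales.length b0 hl
            (by omega) hb0len hnilX hbadb0 (by omega)
        have hrl : rest.length = 2 := by simpa using h3
        have hAstep : stepA sales (best, left, ((b0 :: rest).length : Int)) r
            = (max (r - (b0 + 1) + 1) best, b0 + 1, 3) := by
          have hc : ((b0 :: rest).length : Int) = 3 := by rw [h3]; norm_num
          simp only [stepA, hc, if_pos hb, hshr]
          norm_num
        have hBstep : stepB (best, left, b0 :: rest) (r, PySem.List.pyGetD sales r 0)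
            = (max best (r - (b0 + 1) + 1), b0 + 1, rest ++ [r]) := by
          have hlen4 : 3 < (b0 :: (rest ++ [r])).length := by
            simp only [List.length_cons, List.length_append, List.length_nil]; omega
          simp only [stepB, List.cons_append, if_pos hb, if_pos hlen4]
        rw [hAstep, hBstep]
        have hnewbad : rest ++ [r] = pvBad sales (b0 + 1) (r + 1) := by
          rw [hrest]
          unfold pvBad
          rw [PySem.List.pyRange_one_succ_right (by omega : b0 + 1 ≤ r),
            List.filter_append]
          simp [hb]
        have hlen3 : ((rest ++ [r]).length : Int) = 3 := by simp [hrl]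
        have := ih (r + 1) (max (r - (b0 + 1) + 1) best) (b0 + 1) (rest ++ [r])
          (by omega) (by omega) (by omega) hnewbad (by simp [hrl])
        rw [hlen3] at this
        rw [max_comm best (r - (b0 + 1) + 1)]
        exact this
      · -- fewer than 3 bad days so far: just count day r
        have hlt3 : (bad.length : Int) < 3 := by
          have : bad.length < 3 := lt_of_le_of_ne hlen h3
          exact_mod_cast this
        have hAstep : stepA sales (best, left, (bad.length : Int)) r
            = (max (r - left + 1) best, left, (bad.length : Int) + 1) := by
          simp only [stepA, if_pos hb,
            shrinkA_of_lt sales sales.length left (bad.length : Int) hlt3]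
        have hBstep : stepB (best, left, bad) (r, PySem.List.pyGetD sales r 0)
            = (max best (r - left + 1), left, bad ++ [r]) := by
          have : ¬ 3 < (bad ++ [r]).length := by
            simp only [List.length_append, List.length_cons, List.length_nil]
            omega
          simp only [stepB, if_pos hb, if_neg this]
        rw [hAstep, hBstep]
        have hcast : ((bad ++ [r]).length : Int) = (bad.length : Int) + 1 := by
          simp
        have := ih (r + 1) (max (r - left + 1) best) left (bad ++ [r])
          hl (by omega) (by omega) hbad'.symm
          (by simp only [List.length_append, List.length_cons, List.length_nil]; omega)
        rw [hcast] at this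
        rw [max_comm best (r - left + 1)]
        exact this
    · -- day r is good: states unchanged apart from best
      have hAstep : stepA sales (best, left, (bad.length : Int)) r
          = (max (r - left + 1) best, left, (bad.length : Int)) := by
        simp only [stepA, if_neg hb]
      have hBstep : stepB (best, left, bad) (r, PySem.List.pyGetD sales r 0)
          = (max best (r - left + 1), left, bad) := by
        simp only [stepB, if_neg hb]
      rw [hAstep, hBstep]
      have hbad' : pvBad sales left (r + 1) = bad := by
        subst hbad
        unfold pvBad
        rw [PySem.List.pyRange_one_succ_right hlr, List.filter_append]
        simp [hb]
      have := ih (r + 1) (max (r - left + 1) best) left bad hl (by omega) (by omega)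
        hbad'.symm hlen
      rw [max_comm best (r - left + 1)]
      exact this

-- ===== VERDICT (by name: the statement is the Claim_ definition above) =====
theorem most_days_with_3_bad_days_at_most_spec : Claim_equal_most_days_with_3_bad_days_at_most := by
  intro sales _
  unfold Spec_most_days_with_3_bad_days_at_most
  unfold most_days_with_3_bad_days_at_most most_days_with_3_bad_days_at_most_alt
  rw [PySem.List.enumerate_eq_map_pyRange sales 0]
  have h := go sales sales.length 0 0 0 [] le_rfl le_rfl (by omega)
    (by unfold pvBad; rw [PySem.List.pyRange_one_eq_nil le_rfl]; rfl) (by simp)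
  simpa using h
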